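-- pv_equiv track=rewrite | github.com/maksympash-code/Algorithms_and_data_structures | HW_11/t11_08.py | merge_count_t_inversions
-- ===== SOURCE A (Python) =====
-- import bisect
--
-- def merge_count_t_inversions(arr, t):
--     n = len(arr)
--     if n <= 1:
--         return arr, 0
--
--     mid = n // 2
--     left, inv_left = merge_count_t_inversions(arr[:mid], t)
--     right, inv_right = merge_count_t_inversions(arr[mid:], t)
--
--     cross_inv = 0
--     for l in left:
--         pos = bisect.bisect_left(right, l - t)
--         cross_inv += pos
--
--     merged = []
--     i = 0
--     j = 0
--     while i < len(left) and j < len(right):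
--         if left[i] <= right[j]:
--             merged.append(left[i])
--             i += 1
--         else:
--             merged.append(right[j])
--             j += 1
--     if i < len(left):
--         merged.extend(left[i:])
--     if j < len(right):
--         merged.extend(right[j:])
--
--     total_inv = inv_left + inv_right + cross_inv
--     return merged, total_inv
-- ===== SOURCE B (Python) =====
-- def merge_count_t_inversions(arr, t):
--     n = len(arr)
--     if n <= 1:
--         return arr, 0
--
--     mid = n // 2
--     left, inv_left = merge_count_t_inversions(arr[:mid], t)
--     right, inv_right = merge_count_t_inversions(arr[mid:], t)
--
--     # two-pointer cross count: one linear sweep instead of a bisect per element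
--     cross = 0
--     j = 0
--     for l in left:
--         while j < len(right) and right[j] < l - t:
--             j += 1
--         cross += j
--
--     # merge built back-to-front: take the larger tail element each step, reverse once
--     merged = []
--     i = len(left)
--     k = len(right)
--     while i > 0 and k > 0:
--         if left[i - 1] <= right[k - 1]:
--             merged.append(right[k - 1])
--             k -= 1
--         else:
--             merged.append(left[i - 1])
--             i -= 1
--     merged.extend(reversed(left[:i]))
--     merged.extend(reversed(right[:k]))
--     merged.reverse()
--
--     return merged, inv_left + inv_right + cross
-- ===== Notes on version B (the rewrite author's own statement) =====
-- stated objective: alternative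
-- what changed: The per-element binary search (bisect) over the right half is replaced by a single monotone two-pointer sweep, and the merge is rebuilt back-to-front (taking the larger tail element and reversing once) instead of front-to-back with slice extends.
import Mathlib
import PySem

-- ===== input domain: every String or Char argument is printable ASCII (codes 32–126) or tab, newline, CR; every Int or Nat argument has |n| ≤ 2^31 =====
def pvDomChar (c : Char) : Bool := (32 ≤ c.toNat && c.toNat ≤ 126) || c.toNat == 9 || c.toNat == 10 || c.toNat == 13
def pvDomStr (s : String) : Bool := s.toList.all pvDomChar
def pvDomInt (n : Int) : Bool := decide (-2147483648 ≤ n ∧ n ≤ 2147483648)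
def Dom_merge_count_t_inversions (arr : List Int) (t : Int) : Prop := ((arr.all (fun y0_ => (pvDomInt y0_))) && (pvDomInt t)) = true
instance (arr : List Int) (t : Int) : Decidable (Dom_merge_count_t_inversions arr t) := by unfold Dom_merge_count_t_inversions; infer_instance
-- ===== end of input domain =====

-- B replaces A's per-element binary search with one monotone two-pointer sweep and merges
-- back-to-front (alternative algorithm, same exact result). Equivalence is about return values.

-- ===== PORT A =====

-- bisect.bisect_left(a, x): CPython's lo/hi binary search, step for step (lo=0, hi=len(a)).
def pvBisectGo (a : List Int) (x : Int) (lo hi : Nat) : Nat :=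
  if h : lo < hi then
    let mid := (lo + hi) / 2
    if a.getD mid 0 < x then pvBisectGo a x (mid + 1) hi
    else pvBisectGo a x lo mid
  else lo
termination_by hi - lo
decreasing_by
  · omega
  · omega

-- A's while-merge over indices i, j with the two trailing extend(left[i:]) / extend(right[j:]).
def pvMergeLoopA (left right : List Int) (i j : Nat) (merged : List Int) : List Int :=
  if hij : i < left.length ∧ j < right.length then
    if left.getD i 0 ≤ right.getD j 0 then
      pvMergeLoopA left right (i + 1) j (merged ++ [left.getD i 0])
    else
      pvMergeLoopA left right i (j + 1) (merged ++ [right.getD j 0])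
  else
    merged ++ (if i < left.length then left.drop i else [])
           ++ (if j < right.length then right.drop j else [])
termination_by (left.length - i) + (right.length - j)
decreasing_by
  · omega
  · omega

-- arr[:mid] / arr[mid:] with 0 ≤ mid ≤ len are exactly take/drop (PySem.List.slice_to_natCast / slice_from_natCast).
def merge_count_t_inversions (arr : List Int) (t : Int) : List Int × Int :=
  let n := arr.length
  if n ≤ 1 then (arr, 0)
  else
    let mid := n / 2
    let pl := merge_count_t_inversions (arr.take mid) t
    let pr := merge_count_t_inversions (arr.drop mid) t
    let left := pl.1
    let right := pr.1
    let cross := left.foldl (fun acc l => acc + ((pvBisectGo right (l - t) 0 right.length : Nat) : Int)) 0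
    let merged := pvMergeLoopA left right 0 0 []
    (merged, pl.2 + pr.2 + cross)
termination_by arr.length
decreasing_by
  · simp; omega
  · simp; omega

-- ===== PORT B =====

-- B's inner while: advance j while j < len(right) and right[j] < x.
def pvAdvance (right : List Int) (x : Int) (j : Nat) : Nat :=
  if h : j < right.length then
    if right.getD j 0 < x then pvAdvance right x (j + 1) else j
  else j
termination_by right.length - j
decreasing_by omega

-- B's back-to-front merge loop: i, k count the remaining prefixes; take the larger tail
-- element each step; afterwards append the reversed leftovers (the list is reversed once at the end).
def pvMergeLoopB (left right : List Int) (i k : Nat) (merged : List Int) : List Int :=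
  if hik : 0 < i ∧ 0 < k then
    if left.getD (i - 1) 0 ≤ right.getD (k - 1) 0 then
      pvMergeLoopB left right i (k - 1) (merged ++ [right.getD (k - 1) 0])
    else
      pvMergeLoopB left right (i - 1) k (merged ++ [left.getD (i - 1) 0])
  else
    merged ++ (left.take i).reverse ++ (right.take k).reverse
termination_by i + k
decreasing_by
  · omega
  · omega

def merge_count_t_inversions_alt (arr : List Int) (t : Int) : List Int × Int :=
  let n := arr.length
  if n ≤ 1 then (arr, 0)
  else
    let mid := n / 2
    let pl := merge_count_t_inversions_alt (arr.take mid) t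
    let pr := merge_count_t_inversions_alt (arr.drop mid) t
    let left := pl.1
    let right := pr.1
    let s := left.foldl
      (fun (s : Nat × Int) l =>
        let j := pvAdvance right (l - t) s.1
        (j, s.2 + (j : Int))) (0, 0)
    let merged := (pvMergeLoopB left right left.length right.length []).reverse
    (merged, pl.2 + pr.2 + s.2)
termination_by arr.length
decreasing_by
  · simp; omega
  · simp; omega

-- ===== PRECONDITION & SPEC =====
def Spec_merge_count_t_inversions (arr : List Int) (t : Int) (out : List Int × Int) : Prop := out = merge_count_t_inversions_alt arr t
instance (arr : List Int) (t : Int) (out : List Int × Int) : Decidable (Spec_merge_count_t_inversions arr t out) := by unfold Spec_merge_count_t_inversions; infer_instance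

-- ===== CLAIM (what is proved, stated in full; the proofs are below) =====
def Claim_equal_merge_count_t_inversions : Prop := ∀ (arr : List Int) (t : Int), Dom_merge_count_t_inversions arr t → Spec_merge_count_t_inversions arr t (merge_count_t_inversions arr t)

-- ===== LEMMAS AND PROOFS =====

-- Reference merge (proof helper only): the standard structural merge, left preferred on ties.
def pvMerge : List Int → List Int → List Int
  | [], ys => ys
  | x :: xs, [] => x :: xs
  | x :: xs, y :: ys =>
    if x ≤ y then x :: pvMerge xs (y :: ys) else y :: pvMerge (x :: xs) ys

theorem pvMerge_nil_right (xs : List Int) : pvMerge xs [] = xs := by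
  cases xs <;> simp [pvMerge]

theorem mem_pvMerge (xs ys : List Int) (a : Int) :
    a ∈ pvMerge xs ys ↔ a ∈ xs ∨ a ∈ ys := by
  fun_induction pvMerge xs ys with
  | case1 ys => simp
  | case2 xs h => simp
  | case3 x xs y ys h ih => simp [pvMerge, h, ih]; tauto
  | case4 x xs y ys h ih => simp [pvMerge, h, ih]; tauto

theorem pvMerge_sorted (xs ys : List Int)
    (hx : xs.Pairwise (· ≤ ·)) (hy : ys.Pairwise (· ≤ ·)) :
    (pvMerge xs ys).Pairwise (· ≤ ·) := by
  fun_induction pvMerge xs ys with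
  | case1 ys => exact hy
  | case2 xs h => exact hx
  | case3 x xs y ys h ih =>
    refine List.pairwise_cons.mpr ⟨?_, ih (List.pairwise_cons.mp hx).2 hy⟩
    intro b hb
    rcases (mem_pvMerge _ _ _).mp hb with hb | hb
    · exact (List.pairwise_cons.mp hx).1 b hb
    · rcases List.mem_cons.mp hb with hb | hb
      · exact hb ▸ h
      · exact le_trans h ((List.pairwise_cons.mp hy).1 b hb)
  | case4 x xs y ys h ih =>
    refine List.pairwise_cons.mpr ⟨?_, ih hx (List.pairwise_cons.mp hy).2⟩
    intro b hb
    rcases (mem_pvMerge _ _ _).mp hb with hb | hb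
    · rcases List.mem_cons.mp hb with hb | hb
      · exact hb ▸ (by omega : y ≤ x)
      · exact le_trans (by omega : y ≤ x) ((List.pairwise_cons.mp hx).1 b hb)
    · exact (List.pairwise_cons.mp hy).1 b hb

-- A's index merge equals the structural merge of the suffixes.
theorem pvMergeLoopA_eq (left right : List Int) (i j : Nat) (merged : List Int) :
    pvMergeLoopA left right i j merged = merged ++ pvMerge (left.drop i) (right.drop j) := by
  fun_induction pvMergeLoopA left right i j merged with
  | case1 i j merged hij hle ih =>
    rw [ih, List.drop_eq_getElem_cons hij.1, List.drop_eq_getElem_cons hij.2]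
    simp only [pvMerge, List.getD_eq_getElem _ _ hij.1, List.getD_eq_getElem _ _ hij.2] at hle ⊢
    rw [if_pos hle, ← List.drop_eq_getElem_cons hij.2]
    simp
  | case2 i j merged hij hle ih =>
    rw [ih, List.drop_eq_getElem_cons hij.1, List.drop_eq_getElem_cons hij.2]
    simp only [pvMerge, List.getD_eq_getElem _ _ hij.1, List.getD_eq_getElem _ _ hij.2] at hle ⊢
    rw [if_neg hle, ← List.drop_eq_getElem_cons hij.1]
    simp
  | case3 i j merged hij =>
    rcases Decidable.not_and_iff_not_or_not.mp hij with h | h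
    · have hd : left.drop i = [] := List.drop_eq_nil_of_le (by omega)
      rw [hd]
      by_cases hj : j < right.length
      · simp [h, hj, pvMerge]
      · have : right.drop j = [] := List.drop_eq_nil_of_le (by omega)
        simp [h, hj, this, pvMerge]
    · have hd : right.drop j = [] := List.drop_eq_nil_of_le (by omega)
      rw [hd, pvMerge_nil_right]
      by_cases hi : i < left.length
      · simp [h, hi]
      · have : left.drop i = [] := List.drop_eq_nil_of_le (by omega)
        simp [h, hi, this]

-- Pulling a maximal element out of the right argument of pvMerge.
theorem pvMerge_snoc_right : ∀ (xs ys : List Int) (b : Int), (∀ a ∈ xs, a ≤ b) →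
    pvMerge xs (ys ++ [b]) = pvMerge xs ys ++ [b]
  | [], ys, b, _ => by simp [pvMerge]
  | x :: xs, [], b, hb => by
    have h : x ≤ b := hb x (by simp)
    have h2 := pvMerge_snoc_right xs [] b (fun a ha => hb a (by simp [ha]))
    simp only [List.nil_append, pvMerge_nil_right] at h2
    simp only [List.nil_append, pvMerge, if_pos h, h2, pvMerge_nil_right, List.cons_append]
  | x :: xs, y :: ys, b, hb => by
    by_cases h : x ≤ y
    · simp only [List.cons_append, pvMerge, if_pos h]
      rw [← List.cons_append,
          pvMerge_snoc_right xs (y :: ys) b (fun a ha => hb a (by simp [ha]))]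
    · simp only [List.cons_append, pvMerge, if_neg h]
      rw [← List.cons_append, pvMerge_snoc_right (x :: xs) ys b hb, List.cons_append]
termination_by xs ys _ _ => xs.length + ys.length

-- Pulling a strictly maximal element out of the left argument of pvMerge.
theorem pvMerge_snoc_left : ∀ (xs ys : List Int) (a : Int), (∀ c ∈ ys, c < a) →
    pvMerge (xs ++ [a]) ys = pvMerge xs ys ++ [a]
  | xs, [], a, _ => by simp [pvMerge_nil_right]
  | [], y :: ys, a, ha => by
    have h : ¬ a ≤ y := by have := ha y (by simp); omega
    have h2 := pvMerge_snoc_left [] ys a (fun c hc => ha c (by simp [hc]))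
    simp only [List.nil_append, pvMerge] at h2 ⊢
    simp [if_neg h, h2]
  | x :: xs, y :: ys, a, ha => by
    by_cases h : x ≤ y
    · simp only [List.cons_append, pvMerge, if_pos h]
      rw [← List.cons_append, pvMerge_snoc_left xs (y :: ys) a ha, List.cons_append]
    · simp only [List.cons_append, pvMerge, if_neg h]
      rw [← List.cons_append,
          pvMerge_snoc_left (x :: xs) ys a (fun c hc => ha c (by simp [hc]))]
termination_by xs ys _ _ => xs.length + ys.length

-- B's back-to-front loop builds the reverse of the structural merge of the prefixes.
theorem pvMergeLoopB_eq (left right : List Int)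
    (hl : left.Pairwise (· ≤ ·)) (hr : right.Pairwise (· ≤ ·))
    (i k : Nat) (merged : List Int) (hi : i ≤ left.length) (hk : k ≤ right.length) :
    pvMergeLoopB left right i k merged
      = merged ++ (pvMerge (left.take i) (right.take k)).reverse := by
  fun_induction pvMergeLoopB left right i k merged with
  | case1 i k merged hik hle ih =>
    have hi1 : i - 1 < left.length := by omega
    have hk1 : k - 1 < right.length := by omega
    have htk : right.take k = right.take (k - 1) ++ [right[k - 1]] := by
      have hh : k = (k - 1) + 1 := by omega
      conv_lhs => rw [hh]
      rw [List.take_add_one]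
      simp [List.getElem?_eq_getElem hk1]
    have hti : left.take i = left.take (i - 1) ++ [left[i - 1]] := by
      have hh : i = (i - 1) + 1 := by omega
      conv_lhs => rw [hh]
      rw [List.take_add_one]
      simp [List.getElem?_eq_getElem hi1]
    simp only [List.getD_eq_getElem _ _ hi1, List.getD_eq_getElem _ _ hk1] at hle
    have hbound : ∀ a ∈ left.take i, a ≤ right[k - 1] := by
      intro a ha
      have hsort : (left.take i).Pairwise (· ≤ ·) := hl.sublist (List.take_sublist _ _)
      rw [hti] at hsort ha
      rcases List.mem_append.mp ha with ha | ha
      · have := (List.pairwise_append.mp hsort).2.2 a ha left[i - 1] (by simp)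
        omega
      · simp at ha; omega
    rw [ih (by omega) (by omega), htk, pvMerge_snoc_right _ _ _ hbound]
    simp [List.getElem?_eq_getElem hk1]
  | case2 i k merged hik hle ih =>
    have hi1 : i - 1 < left.length := by omega
    have hk1 : k - 1 < right.length := by omega
    have htk : right.take k = right.take (k - 1) ++ [right[k - 1]] := by
      have hh : k = (k - 1) + 1 := by omega
      conv_lhs => rw [hh]
      rw [List.take_add_one]
      simp [List.getElem?_eq_getElem hk1]
    have hti : left.take i = left.take (i - 1) ++ [left[i - 1]] := by
      have hh : i = (i - 1) + 1 := by omega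
      conv_lhs => rw [hh]
      rw [List.take_add_one]
      simp [List.getElem?_eq_getElem hi1]
    simp only [List.getD_eq_getElem _ _ hi1, List.getD_eq_getElem _ _ hk1] at hle
    have hbound : ∀ c ∈ right.take k, c < left[i - 1] := by
      intro c hc
      have hsort : (right.take k).Pairwise (· ≤ ·) := hr.sublist (List.take_sublist _ _)
      rw [htk] at hsort hc
      rcases List.mem_append.mp hc with hc | hc
      · have := (List.pairwise_append.mp hsort).2.2 c hc right[k - 1] (by simp)
        omega
      · simp at hc; omega
    rw [ih (by omega) (by omega), hti, pvMerge_snoc_left _ _ _ hbound]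
    simp [List.getElem?_eq_getElem hi1]
  | case3 i k merged hik =>
    rcases Decidable.not_and_iff_not_or_not.mp hik with h | h
    · have : i = 0 := by omega
      subst this
      simp [pvMerge]
    · have : k = 0 := by omega
      subst this
      simp [pvMerge_nil_right]

-- For a sorted list, position k holds a value < x exactly when k is below the count of values < x.
theorem countP_lt_iff (l : List Int) (x : Int) (hs : l.Pairwise (· ≤ ·))
    (k : Nat) (hk : k < l.length) :
    (k < l.countP (fun y => decide (y < x))) ↔ l[k] < x := by
  induction l generalizing k with
  | nil => simp at hk
  | cons a l ih =>
    have ha := (List.pairwise_cons.mp hs).1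
    have hs' := (List.pairwise_cons.mp hs).2
    by_cases hax : a < x
    · cases k with
      | zero => simp [List.countP_cons, hax]
      | succ k =>
        simp only [List.countP_cons, hax, decide_true, if_true, List.getElem_cons_succ]
        rw [← ih hs' k (by simpa using hk)]
        omega
    · have hz : l.countP (fun y => decide (y < x)) = 0 := by
        rw [List.countP_eq_zero]
        intro b hb
        have := ha b hb
        simp; omega
      cases k with
      | zero => simp [List.countP_cons, hax, hz]
      | succ k =>
        have hkl : k < l.length := by simpa using hk
        have := ha _ (List.getElem_mem hkl)
        simp [List.countP_cons, hax, hz]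
        omega

-- bisect_left on a sorted list returns the count of elements < x.
theorem pvBisectGo_eq (right : List Int) (x : Int) (lo hi : Nat)
    (hs : right.Pairwise (· ≤ ·))
    (h1 : lo ≤ right.countP (fun y => decide (y < x)))
    (h2 : right.countP (fun y => decide (y < x)) ≤ hi)
    (h3 : hi ≤ right.length) :
    pvBisectGo right x lo hi = right.countP (fun y => decide (y < x)) := by
  fun_induction pvBisectGo right x lo hi with
  | case1 lo hi h mid hmid ih =>
    have hm : mid < right.length := by omega
    rw [List.getD_eq_getElem _ _ hm] at hmid
    have : mid < right.countP (fun y => decide (y < x)) :=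
      (countP_lt_iff right x hs mid hm).mpr hmid
    exact ih (by omega) h2 h3
  | case2 lo hi h mid hmid ih =>
    have hm : mid < right.length := by omega
    rw [List.getD_eq_getElem _ _ hm] at hmid
    have : ¬ mid < right.countP (fun y => decide (y < x)) := by
      intro hc
      exact hmid ((countP_lt_iff right x hs mid hm).mp hc)
    exact ih h1 (by omega) (by omega)
  | case3 lo hi h => omega

-- the two-pointer advance lands on the same count, provided it starts at or below it.
theorem pvAdvance_eq (right : List Int) (x : Int) (j : Nat)
    (hs : right.Pairwise (· ≤ ·))
    (hj : j ≤ right.countP (fun y => decide (y < x))) :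
    pvAdvance right x j = right.countP (fun y => decide (y < x)) := by
  fun_induction pvAdvance right x j with
  | case1 j h hlt ih =>
    rw [List.getD_eq_getElem _ _ h] at hlt
    have : j < right.countP (fun y => decide (y < x)) :=
      (countP_lt_iff right x hs j h).mpr hlt
    exact ih (by omega)
  | case2 j h hlt =>
    rw [List.getD_eq_getElem _ _ h] at hlt
    have : ¬ j < right.countP (fun y => decide (y < x)) := by
      intro hc
      exact hlt ((countP_lt_iff right x hs j h).mp hc)
    omega
  | case3 j h =>
    have := List.countP_le_length (l := right) (p := fun y => decide (y < x))
    omega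

-- A's accumulation loop is the sum of the per-element counts.
theorem foldl_add_map (f : Int → Int) (l : List Int) (a : Int) :
    l.foldl (fun acc v => acc + f v) a = a + (l.map f).sum := by
  induction l generalizing a with
  | nil => simp
  | cons x l ih => simp [ih]; ring

-- B's two-pointer loop computes the same sum of counts, using monotonicity of the thresholds.
theorem foldTP (right : List Int) (t : Int) (hr : right.Pairwise (· ≤ ·))
    (left : List Int) (hl : left.Pairwise (· ≤ ·)) :
    ∀ (j : Nat) (acc : Int),
      (∀ l ∈ left, j ≤ right.countP (fun y => decide (y < l - t))) →
      (left.foldl (fun (s : Nat × Int) l =>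
          let j' := pvAdvance right (l - t) s.1
          (j', s.2 + (j' : Int))) (j, acc)).2
        = acc + (left.map (fun l => ((right.countP (fun y => decide (y < l - t)) : Nat) : Int))).sum := by
  induction left with
  | nil => intro j acc _; simp
  | cons l ls ih =>
    intro j acc hjb
    have hadv : pvAdvance right (l - t) j = right.countP (fun y => decide (y < l - t)) :=
      pvAdvance_eq right (l - t) j hr (hjb l (by simp))
    simp only [List.foldl_cons, hadv]
    rw [ih (List.pairwise_cons.mp hl).2 _ _ ?_]
    · simp; ring
    · intro m hm
      have hlm : l ≤ m := (List.pairwise_cons.mp hl).1 m hm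
      exact List.countP_mono_left (by intro y _ hy; simp at hy ⊢; omega)

-- Main induction: the two ports agree, and the (shared) result list is sorted.
theorem pv_main (t : Int) : ∀ (n : Nat) (arr : List Int), arr.length ≤ n →
    merge_count_t_inversions arr t = merge_count_t_inversions_alt arr t ∧
    (merge_count_t_inversions_alt arr t).1.Pairwise (· ≤ ·) := by
  intro n
  induction n with
  | zero =>
    intro arr h
    have : arr = [] := List.eq_nil_of_length_eq_zero (by omega)
    subst this
    refine ⟨?_, ?_⟩
    · rw [merge_count_t_inversions, merge_count_t_inversions_alt]
      simp
    · rw [merge_count_t_inversions_alt]; simp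
  | succ n ih =>
    intro arr hlen
    by_cases hsmall : arr.length ≤ 1
    · refine ⟨?_, ?_⟩
      · rw [merge_count_t_inversions, merge_count_t_inversions_alt]
        simp [hsmall]
      · rw [merge_count_t_inversions_alt]
        simp only [if_pos hsmall]
        match arr, hsmall with
        | [], _ => simp
        | [a], _ => simp
    · have h2 : 2 ≤ arr.length := by omega
      have hmid1 : (arr.take (arr.length / 2)).length ≤ n := by
        simp; omega
      have hmid2 : (arr.drop (arr.length / 2)).length ≤ n := by
        simp; omega
      obtain ⟨eL, sL⟩ := ih _ hmid1
      obtain ⟨eR, sR⟩ := ih _ hmid2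
      set L := merge_count_t_inversions_alt (arr.take (arr.length / 2)) t with hLdef
      set R := merge_count_t_inversions_alt (arr.drop (arr.length / 2)) t with hRdef
      have hA : merge_count_t_inversions arr t =
          (pvMergeLoopA L.1 R.1 0 0 [],
           L.2 + R.2 + L.1.foldl
             (fun acc l => acc + ((pvBisectGo R.1 (l - t) 0 R.1.length : Nat) : Int)) 0) := by
        rw [merge_count_t_inversions]
        simp only [if_neg hsmall, eL, eR]
      have hB : merge_count_t_inversions_alt arr t =
          ((pvMergeLoopB L.1 R.1 L.1.length R.1.length []).reverse,
           L.2 + R.2 + (L.1.foldl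
             (fun (s : Nat × Int) l =>
               let j := pvAdvance R.1 (l - t) s.1
               (j, s.2 + (j : Int))) (0, 0)).2) := by
        rw [merge_count_t_inversions_alt]
        simp only [if_neg hsmall]
        rw [← hLdef, ← hRdef]
      have hmergedA : pvMergeLoopA L.1 R.1 0 0 [] = pvMerge L.1 R.1 := by
        rw [pvMergeLoopA_eq]
        simp
      have hmergedB : (pvMergeLoopB L.1 R.1 L.1.length R.1.length []).reverse
          = pvMerge L.1 R.1 := by
        rw [pvMergeLoopB_eq L.1 R.1 sL sR _ _ [] le_rfl le_rfl]
        simp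
      have hcrossA : L.1.foldl
            (fun acc l => acc + ((pvBisectGo R.1 (l - t) 0 R.1.length : Nat) : Int)) 0
          = (L.1.map (fun l => ((R.1.countP (fun y => decide (y < l - t)) : Nat) : Int))).sum := by
        have hf : (fun (acc : Int) (l : Int) =>
              acc + ((pvBisectGo R.1 (l - t) 0 R.1.length : Nat) : Int))
            = (fun (acc : Int) (l : Int) =>
              acc + ((R.1.countP (fun y => decide (y < l - t)) : Nat) : Int)) := by
          funext acc l
          rw [pvBisectGo_eq R.1 (l - t) 0 R.1.length sR (Nat.zero_le _)
                List.countP_le_length le_rfl]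
        rw [hf, foldl_add_map (fun l => ((R.1.countP (fun y => decide (y < l - t)) : Nat) : Int))]
        simp
      have hcrossB : (L.1.foldl
            (fun (s : Nat × Int) l =>
              let j := pvAdvance R.1 (l - t) s.1
              (j, s.2 + (j : Int))) (0, 0)).2
          = (L.1.map (fun l => ((R.1.countP (fun y => decide (y < l - t)) : Nat) : Int))).sum := by
        rw [foldTP R.1 t sR L.1 sL 0 0 (fun l _ => Nat.zero_le _)]
        simp
      refine ⟨?_, ?_⟩
      · rw [hA, hB, hmergedA, hmergedB, hcrossA, hcrossB]
      · rw [hB]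
        simpa [hmergedB] using pvMerge_sorted L.1 R.1 sL sR

-- ===== VERDICT (by name: the statement is the Claim_ definition above) =====
theorem merge_count_t_inversions_spec : Claim_equal_merge_count_t_inversions := by
  intro arr t _
  unfold Spec_merge_count_t_inversions
  exact (pv_main t arr.length arr le_rfl).1
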